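-- pv_equiv track=rewrite | github.com/cubazis/inno_nummod_fall_2019 | project/project.py | is_in_house
-- ===== SOURCE A (Python) =====
-- def is_in_house(x, y):
--     box_houses = [
--         (69, 111),
--         (69, 264),
--         (138, 12),
--         (138, 165),
--         (192, 111),
--         (192, 264),
--         (261, 12),
--         (261, 165)
--     ]
--
--     bottom_corner_houses = [
--         (69, 12),
--         (69, 165),
--         (192, 12),
--         (192, 165)
--     ]
--
--     top_corner_houses = [
--         (138, 51),
--         (138, 204),
--         (261, 51),
--         (261, 204)
--     ]
--
--     for house in box_houses:
--         if house[0] < x < house[0] + 18 and house[1] < y < house[1] + 18: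
--             return True
--
--     for house in bottom_corner_houses:
--         if (house[0] < x < house[0] + 18 and house[1] < y < house[1] + 78) or \
--                 (house[0] + 12 < x < house[0] + 24 and house[1] < y < house[1] + 18):
--             return True
--
--     for house in top_corner_houses:
--         if (house[0] < x < house[0] + 18 and house[1] < y < house[1] + 78) or \
--                 (house[0] - 12 < x < house[0] + 1 and house[1] + 60 < y < house[1] + 78):
--             return True
--     return False
-- ===== SOURCE B (Python) =====
-- # Symmetry reduction: all 16 houses are translates of a 4-house fundamental cell by
-- # (0 or 123, 0 or 153); shift the point into the cell instead of enumerating all houses.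
--
-- def _in_cell(u, v):
--     # fundamental cell: box houses at (69,111) and (138,12),
--     # bottom-corner house at (69,12), top-corner house at (138,51)
--     return (69 < u < 87 and 111 < v < 129) \
--         or (138 < u < 156 and 12 < v < 30) \
--         or (69 < u < 87 and 12 < v < 90) or (81 < u < 93 and 12 < v < 30) \
--         or (138 < u < 156 and 51 < v < 129) or (126 < u < 139 and 111 < v < 129)
--
-- def is_in_house(x, y):
--     return any(_in_cell(x - dx, y - dy) for dx in (0, 123) for dy in (0, 153))
-- ===== Notes on version B (the rewrite author's own statement) =====
-- stated objective: alternative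
-- what changed: B exploits the translational symmetry of the map: all 16 houses are translates of a 4-house fundamental cell by (0|123, 0|153), so B tests only the 6 rectangles of one cell against the 4 shifted copies of the point, instead of A's three differently-shaped loops over all 16 houses.
import Mathlib
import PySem

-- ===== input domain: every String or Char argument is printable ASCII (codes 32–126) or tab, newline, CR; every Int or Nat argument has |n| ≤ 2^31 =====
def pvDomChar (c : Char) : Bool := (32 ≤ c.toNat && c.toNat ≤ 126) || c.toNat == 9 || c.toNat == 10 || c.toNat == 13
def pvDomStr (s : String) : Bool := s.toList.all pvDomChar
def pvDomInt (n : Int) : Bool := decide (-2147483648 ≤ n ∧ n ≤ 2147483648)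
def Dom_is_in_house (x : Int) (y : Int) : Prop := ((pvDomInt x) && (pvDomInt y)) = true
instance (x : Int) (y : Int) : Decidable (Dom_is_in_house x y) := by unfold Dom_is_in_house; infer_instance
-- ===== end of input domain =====

-- B exploits the translational symmetry of the house layout (every house is a translate of a
-- 4-house fundamental cell by (0|123, 0|153)) instead of enumerating all 16 houses (alternative).

-- ===== PORT A =====
-- the three Python loops with early return, each as its own structural recursion
def pvLoopBox (x y : Int) : List (Int × Int) → Bool
  | [] => false
  | h :: t =>
    if h.1 < x ∧ x < h.1 + 18 ∧ h.2 < y ∧ y < h.2 + 18 then true else pvLoopBox x y t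

def pvLoopBottom (x y : Int) : List (Int × Int) → Bool
  | [] => false
  | h :: t =>
    if (h.1 < x ∧ x < h.1 + 18 ∧ h.2 < y ∧ y < h.2 + 78) ∨
       (h.1 + 12 < x ∧ x < h.1 + 24 ∧ h.2 < y ∧ y < h.2 + 18) then true
    else pvLoopBottom x y t

def pvLoopTop (x y : Int) : List (Int × Int) → Bool
  | [] => false
  | h :: t =>
    if (h.1 < x ∧ x < h.1 + 18 ∧ h.2 < y ∧ y < h.2 + 78) ∨
       (h.1 - 12 < x ∧ x < h.1 + 1 ∧ h.2 + 60 < y ∧ y < h.2 + 78) then true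
    else pvLoopTop x y t

def is_in_house (x : Int) (y : Int) : Bool :=
  let box_houses : List (Int × Int) :=
    [(69, 111), (69, 264), (138, 12), (138, 165),
     (192, 111), (192, 264), (261, 12), (261, 165)]
  let bottom_corner_houses : List (Int × Int) := [(69, 12), (69, 165), (192, 12), (192, 165)]
  let top_corner_houses : List (Int × Int) := [(138, 51), (138, 204), (261, 51), (261, 204)]
  if pvLoopBox x y box_houses then true
  else if pvLoopBottom x y bottom_corner_houses then true
  else if pvLoopTop x y top_corner_houses then true
  else false

-- ===== PORT B =====
-- membership in the fundamental cell (6 open rectangles), exactly Source B's _in_cell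
def pvInCell (u v : Int) : Bool :=
  decide ((69 < u ∧ u < 87 ∧ 111 < v ∧ v < 129) ∨
          (138 < u ∧ u < 156 ∧ 12 < v ∧ v < 30) ∨
          (69 < u ∧ u < 87 ∧ 12 < v ∧ v < 90) ∨ (81 < u ∧ u < 93 ∧ 12 < v ∧ v < 30) ∨
          (138 < u ∧ u < 156 ∧ 51 < v ∧ v < 129) ∨ (126 < u ∧ u < 139 ∧ 111 < v ∧ v < 129))

def is_in_house_alt (x : Int) (y : Int) : Bool :=
  ([(0, 0), (0, 153), (123, 0), (123, 153)] : List (Int × Int)).any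
    (fun d => pvInCell (x - d.1) (y - d.2))

-- ===== PRECONDITION & SPEC =====
def Spec_is_in_house (x : Int) (y : Int) (out : Bool) : Prop := out = is_in_house_alt x y
instance (x : Int) (y : Int) (out : Bool) : Decidable (Spec_is_in_house x y out) := by unfold Spec_is_in_house; infer_instance

-- ===== CLAIM (what is proved, stated in full; the proofs are below) =====
def Claim_equal_is_in_house : Prop := ∀ (x : Int) (y : Int), Dom_is_in_house x y → Spec_is_in_house x y (is_in_house x y)

-- ===== LEMMAS AND PROOFS =====
-- proof-only helpers: both programs are 'any' over a 24-rectangle list; the lists are permutations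
def pvHit (x y : Int) (r : Int × Int × Int × Int) : Bool :=
  decide (r.1 < x ∧ x < r.2.1 ∧ r.2.2.1 < y ∧ y < r.2.2.2)

def pvLA : List (Int × Int × Int × Int) :=
  [(69, 69+18, 111, 111+18), (69, 69+18, 264, 264+18), (138, 138+18, 12, 12+18),
   (138, 138+18, 165, 165+18), (192, 192+18, 111, 111+18), (192, 192+18, 264, 264+18),
   (261, 261+18, 12, 12+18), (261, 261+18, 165, 165+18),
   (69, 69+18, 12, 12+78), (69+12, 69+24, 12, 12+18),
   (69, 69+18, 165, 165+78), (69+12, 69+24, 165, 165+18),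
   (192, 192+18, 12, 12+78), (192+12, 192+24, 12, 12+18),
   (192, 192+18, 165, 165+78), (192+12, 192+24, 165, 165+18),
   (138, 138+18, 51, 51+78), (138-12, 138+1, 51+60, 51+78),
   (138, 138+18, 204, 204+78), (138-12, 138+1, 204+60, 204+78),
   (261, 261+18, 51, 51+78), (261-12, 261+1, 51+60, 51+78),
   (261, 261+18, 204, 204+78), (261-12, 261+1, 204+60, 204+78)]

def pvLB : List (Int × Int × Int × Int) :=
  [(69+0, 87+0, 111+0, 129+0), (138+0, 156+0, 12+0, 30+0), (69+0, 87+0, 12+0, 90+0),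
   (81+0, 93+0, 12+0, 30+0), (138+0, 156+0, 51+0, 129+0), (126+0, 139+0, 111+0, 129+0),
   (69+0, 87+0, 111+153, 129+153), (138+0, 156+0, 12+153, 30+153), (69+0, 87+0, 12+153, 90+153),
   (81+0, 93+0, 12+153, 30+153), (138+0, 156+0, 51+153, 129+153), (126+0, 139+0, 111+153, 129+153),
   (69+123, 87+123, 111+0, 129+0), (138+123, 156+123, 12+0, 30+0), (69+123, 87+123, 12+0, 90+0),
   (81+123, 93+123, 12+0, 30+0), (138+123, 156+123, 51+0, 129+0), (126+123, 139+123, 111+0, 129+0),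
   (69+123, 87+123, 111+153, 129+153), (138+123, 156+123, 12+153, 30+153), (69+123, 87+123, 12+153, 90+153),
   (81+123, 93+123, 12+153, 30+153), (138+123, 156+123, 51+153, 129+153), (126+123, 139+123, 111+153, 129+153)]

lemma pvIfOr (p : Prop) [Decidable p] (c : Bool) :
    (if p then true else c) = (decide p || c) := by
  by_cases h : p <;> simp [h]

lemma pvA_any (x y : Int) : is_in_house x y = pvLA.any (pvHit x y) := by
  simp only [is_in_house, pvLoopBox, pvLoopBottom, pvLoopTop, pvIfOr,
    pvLA, pvHit, List.any_cons, List.any_nil, Bool.or_false, Bool.or_assoc, Bool.decide_eq_true,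
    Bool.decide_or, Bool.decide_and]

lemma pvB_any (x y : Int) : is_in_house_alt x y = pvLB.any (pvHit x y) := by
  simp only [is_in_house_alt, pvInCell, pvLB, pvHit, List.any_cons, List.any_nil,
    Bool.or_false, Bool.or_assoc, Bool.decide_or, Bool.decide_and,
    lt_sub_iff_add_lt, sub_lt_iff_lt_add]

lemma pvPerm : pvLA.Perm pvLB := by decide

-- ===== VERDICT (by name: the statement is the Claim_ definition above) =====
theorem is_in_house_spec : Claim_equal_is_in_house := by
  intro x y _
  unfold Spec_is_in_house
  rw [pvA_any, pvB_any]
  exact pvPerm.any_eq
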